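-- pv_equiv track=rewrite | github.com/wafflemancer/alexbot | calls/attribute.py | _kubera_calc
-- ===== SOURCE A (Python) =====
-- import math
--
-- def _kubera_calc(day,month,year,hour,attributes,today=False):
--
--     start_day=6
--     start_month=2
--     start_year=1990
--
--     if month>2:
--         leapdays=int(math.ceil((year-start_year)/4))
--     else:
--         leapdays=int(math.floor((year-start_year)/4))
--     nbr_days=leapdays+(year-start_year)*365+(day-start_day)
--
--     y=month-start_month
--     z=1
--
--     if y<0:
--         y=-y
--         z=-1
--
--     for x in range(y):
--         if x==3 or x==5 or x==8 or x==10: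
--             nbr_days+=30*z
--         else:
--             if x==1:
--                 nbr_days+=28*z
--             else:
--                 nbr_days+=31*z
--
--     if nbr_days>0:
--         nd="N"
--         show_year=nd+str(math.floor(nbr_days/432))
--     else:
--         nd="D"
--         show_year=nd+str(1000+(math.floor(nbr_days/432)))
--
--     out = ("Year:", show_year, "\nMonth:", math.floor((nbr_days % 432)/36) % 12+1, attributes[(math.floor((nbr_days % 432)/36) % 12)], "\nDay:", ((((nbr_days % 432) % 36) % 432) % 12)+1, attributes[((((nbr_days % 432) % 36) % 432) % 12)], "\nHour:", (math.floor(hour/2)) % 12+1, attributes[(math.floor(hour/2)) % 12])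
--     out = [str(i) for i in out]
--     out = ' '.join(out)
--     if today:
--         return 'Today is:\n{}'.format(out)
--     else:
--         return 'You were born on:\n{}'.format(out)
-- ===== SOURCE B (Python) =====
-- def _kubera_calc(day, month, year, hour, attributes, today=False):
--     dy = year - 1990
--     leapdays = -((-dy) // 4) if month > 2 else dy // 4
--     m = month - 2
--     n = abs(m)
--     span = 31 * n - (3 if n >= 2 else 0) - sum(1 for k in (3, 5, 8, 10) if k < n)
--     nbr_days = leapdays + dy * 365 + (day - 6) + (span if m >= 0 else -span)
--     q, r = divmod(nbr_days, 432)
--     show_year = ("N" + str(q)) if nbr_days > 0 else ("D" + str(1000 + q))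
--     m_idx = (r // 36) % 12
--     d_idx = (r % 36) % 12
--     h_idx = (hour // 2) % 12
--     body = ' '.join(["Year:", show_year, "\nMonth:", str(m_idx + 1), attributes[m_idx],
--                      "\nDay:", str(d_idx + 1), attributes[d_idx],
--                      "\nHour:", str(h_idx + 1), attributes[h_idx]])
--     return ('Today is:\n' if today else 'You were born on:\n') + body
-- ===== Notes on version B (the rewrite author's own statement) =====
-- stated objective: simpler
-- what changed: B replaces A's O(|month|) per-month accumulation loop with a closed-form span formula (31*n minus fixed corrections), uses divmod once instead of repeated float-floor/mod chains, and drops the redundant nested %432 reductions.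
import Mathlib
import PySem

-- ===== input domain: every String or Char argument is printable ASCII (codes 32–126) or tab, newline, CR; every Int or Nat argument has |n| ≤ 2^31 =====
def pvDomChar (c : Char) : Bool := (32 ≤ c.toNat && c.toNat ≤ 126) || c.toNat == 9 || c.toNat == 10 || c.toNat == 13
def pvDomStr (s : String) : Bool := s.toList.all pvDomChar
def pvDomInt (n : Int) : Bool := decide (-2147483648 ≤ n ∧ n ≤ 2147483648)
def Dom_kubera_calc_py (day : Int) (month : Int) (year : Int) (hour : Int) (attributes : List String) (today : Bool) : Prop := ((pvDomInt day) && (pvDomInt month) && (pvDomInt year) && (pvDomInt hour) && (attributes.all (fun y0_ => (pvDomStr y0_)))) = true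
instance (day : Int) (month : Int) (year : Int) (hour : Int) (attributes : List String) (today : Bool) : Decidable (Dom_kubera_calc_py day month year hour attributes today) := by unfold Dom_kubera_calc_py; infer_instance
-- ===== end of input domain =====

-- B replaces A's per-month accumulation loop by a closed-form span formula and a single divmod;
-- equivalence of return values is proved on Pre_ (where Python A does not raise IndexError).
-- math.ceil((year-1990)/4), math.floor(a/b) etc. are ported as exact integer ceiling/floor division:
-- on the domain |int| ≤ 2^31 every such float division floors/ceils to the same integer (values < 2^53).

-- ===== PORT A =====
def kubera_calc_py (day : Int) (month : Int) (year : Int) (hour : Int) (attributes : List String) (today : Bool) : String :=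
  let start_day : Int := 6
  let start_month : Int := 2
  let start_year : Int := 1990
  -- int(math.ceil(q/4)) = -((-q)//4), int(math.floor(q/4)) = q//4 (exact on the domain)
  let leapdays : Int :=
    if month > 2 then -(PySem.Int.floordiv (-(year - start_year)) 4)
    else PySem.Int.floordiv (year - start_year) 4
  let nbr_days0 : Int := leapdays + (year - start_year) * 365 + (day - start_day)
  let y0 : Int := month - start_month
  let y : Int := if y0 < 0 then -y0 else y0
  let z : Int := if y0 < 0 then -1 else 1
  let nbr_days : Int := (PySem.List.pyRange 0 y 1).foldl (fun nd x =>
      if x = 3 ∨ x = 5 ∨ x = 8 ∨ x = 10 then nd + 30 * z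
      else if x = 1 then nd + 28 * z
      else nd + 31 * z) nbr_days0
  let show_year : String :=
    if nbr_days > 0 then "N" ++ PySem.Int.toStr (PySem.Int.floordiv nbr_days 432)
    else "D" ++ PySem.Int.toStr (1000 + PySem.Int.floordiv nbr_days 432)
  let mIdx : Int := PySem.Int.mod (PySem.Int.floordiv (PySem.Int.mod nbr_days 432) 36) 12
  let dIdx : Int := PySem.Int.mod (PySem.Int.mod (PySem.Int.mod (PySem.Int.mod nbr_days 432) 36) 432) 12
  let hIdx : Int := PySem.Int.mod (PySem.Int.floordiv hour 2) 12
  -- attributes[i] : in-range under Pre_; out of range Python raises IndexError (excluded by Pre_)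
  let out : List String :=
    ["Year:", show_year, "\nMonth:", PySem.Int.toStr (mIdx + 1), PySem.List.pyGetD attributes mIdx "",
     "\nDay:", PySem.Int.toStr (dIdx + 1), PySem.List.pyGetD attributes dIdx "",
     "\nHour:", PySem.Int.toStr (hIdx + 1), PySem.List.pyGetD attributes hIdx ""]
  let joined := PySem.Str.join " " out
  if today then "Today is:\n" ++ joined else "You were born on:\n" ++ joined

-- ===== PORT B =====
-- closed-form month span: sum of month lengths for the first n loop indices
def kuberaSpan (n : Int) : Int :=
  31 * n - (if 2 ≤ n then 3 else 0)
    - ((if 3 < n then 1 else 0) + (if 5 < n then 1 else 0) + (if 8 < n then 1 else 0) + (if 10 < n then 1 else 0))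

def kubera_calc_py_alt (day : Int) (month : Int) (year : Int) (hour : Int) (attributes : List String) (today : Bool) : String :=
  let dy : Int := year - 1990
  let leapdays : Int := if month > 2 then -(PySem.Int.floordiv (-dy) 4) else PySem.Int.floordiv dy 4
  let m : Int := month - 2
  let n : Int := |m|
  let span : Int := kuberaSpan n
  let nbr_days : Int := leapdays + dy * 365 + (day - 6) + (if m ≥ 0 then span else -span)
  let q : Int := PySem.Int.floordiv nbr_days 432
  let r : Int := PySem.Int.mod nbr_days 432
  let show_year : String :=
    if nbr_days > 0 then "N" ++ PySem.Int.toStr q else "D" ++ PySem.Int.toStr (1000 + q)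
  let m_idx : Int := PySem.Int.mod (PySem.Int.floordiv r 36) 12
  let d_idx : Int := PySem.Int.mod (PySem.Int.mod r 36) 12
  let h_idx : Int := PySem.Int.mod (PySem.Int.floordiv hour 2) 12
  let body : String := PySem.Str.join " "
    ["Year:", show_year, "\nMonth:", PySem.Int.toStr (m_idx + 1), PySem.List.pyGetD attributes m_idx "",
     "\nDay:", PySem.Int.toStr (d_idx + 1), PySem.List.pyGetD attributes d_idx "",
     "\nHour:", PySem.Int.toStr (h_idx + 1), PySem.List.pyGetD attributes h_idx ""]
  (if today then "Today is:\n" else "You were born on:\n") ++ body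

-- ===== PRECONDITION & SPEC =====
-- closed-form arithmetic for the day count and the three attribute indices (no loop)
def pvKuberaDays (day : Int) (month : Int) (year : Int) : Int :=
  (if month > 2 then -(PySem.Int.floordiv (-(year - 1990)) 4) else PySem.Int.floordiv (year - 1990) 4)
    + (year - 1990) * 365 + (day - 6)
    + (if month - 2 ≥ 0 then kuberaSpan (month - 2) else -(kuberaSpan (2 - month)))

-- Pre_ excludes exactly the inputs where Python A raises IndexError: one of the three
-- attribute indices (each in 0..11) is ≥ len(attributes).
def Pre_kubera_calc_py (day : Int) (month : Int) (year : Int) (hour : Int) (attributes : List String) (today : Bool) : Prop :=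
  PySem.Int.mod (PySem.Int.floordiv (PySem.Int.mod (pvKuberaDays day month year) 432) 36) 12 < (attributes.length : Int)
  ∧ PySem.Int.mod (PySem.Int.mod (PySem.Int.mod (pvKuberaDays day month year) 432) 36) 12 < (attributes.length : Int)
  ∧ PySem.Int.mod (PySem.Int.floordiv hour 2) 12 < (attributes.length : Int)
instance (day : Int) (month : Int) (year : Int) (hour : Int) (attributes : List String) (today : Bool) : Decidable (Pre_kubera_calc_py day month year hour attributes today) := by unfold Pre_kubera_calc_py; infer_instance

def pvWitness_kubera_calc_py : Int × Int × Int × Int × List String × Bool :=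
  (6, 2, 1990, 0, ["a", "b", "c", "d", "e", "f", "g", "h", "i", "j", "k", "l"], false)

def Spec_kubera_calc_py (day : Int) (month : Int) (year : Int) (hour : Int) (attributes : List String) (today : Bool) (out : String) : Prop := out = kubera_calc_py_alt day month year hour attributes today
instance (day : Int) (month : Int) (year : Int) (hour : Int) (attributes : List String) (today : Bool) (out : String) : Decidable (Spec_kubera_calc_py day month year hour attributes today out) := by unfold Spec_kubera_calc_py; infer_instance

-- ===== CLAIM (what is proved, stated in full; the proofs are below) =====
def Claim_equal_kubera_calc_py : Prop := ∀ (day : Int) (month : Int) (year : Int) (hour : Int) (attributes : List String) (today : Bool), Dom_kubera_calc_py day month year hour attributes today → Pre_kubera_calc_py day month year hour attributes today → Spec_kubera_calc_py day month year hour attributes today (kubera_calc_py day month year hour attributes today)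

-- ===== LEMMAS AND PROOFS =====

-- one loop step extends the closed-form span by that index's month length
theorem kubera_span_step (k : Nat) :
    kuberaSpan ((k : Int) + 1)
      = kuberaSpan (k : Int)
        + (if (k : Int) = 3 ∨ (k : Int) = 5 ∨ (k : Int) = 8 ∨ (k : Int) = 10 then 30
           else if (k : Int) = 1 then 28 else 31) := by
  rcases lt_or_ge k 11 with hk | hk
  · interval_cases k <;> decide
  · have h1 : ¬((k : Int) = 3 ∨ (k : Int) = 5 ∨ (k : Int) = 8 ∨ (k : Int) = 10) := by omega
    have h2 : ¬((k : Int) = 1) := by omega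
    rw [if_neg h1, if_neg h2]
    unfold kuberaSpan
    rw [if_pos (by omega), if_pos (by omega), if_pos (by omega), if_pos (by omega), if_pos (by omega),
        if_pos (by omega), if_pos (by omega), if_pos (by omega), if_pos (by omega), if_pos (by omega)]
    ring

-- A's loop body over range(0, n) sums to z * kuberaSpan n
theorem kubera_loop_sum (n : Nat) (base z : Int) :
    ((PySem.List.pyRange 0 (n : Int) 1).foldl (fun nd x =>
      if x = 3 ∨ x = 5 ∨ x = 8 ∨ x = 10 then nd + 30 * z
      else if x = 1 then nd + 28 * z
      else nd + 31 * z) base) = base + z * kuberaSpan (n : Int) := by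
  induction n generalizing base with
  | zero => simp [kuberaSpan]
  | succ k ih =>
    have h : PySem.List.pyRange 0 ((k : Int) + 1) 1 = PySem.List.pyRange 0 (k : Int) 1 ++ [(k : Int)] :=
      PySem.List.pyRange_one_succ_right (by exact_mod_cast Nat.zero_le k)
    push_cast
    rw [h, List.foldl_append, ih, kubera_span_step k]
    simp only [List.foldl]
    split_ifs <;> ring

theorem kubera_days_eq (day month year : Int) :
    (let y0 : Int := month - 2
     let y : Int := if y0 < 0 then -y0 else y0
     let z : Int := if y0 < 0 then -1 else 1
     (PySem.List.pyRange 0 y 1).foldl (fun nd x =>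
        if x = 3 ∨ x = 5 ∨ x = 8 ∨ x = 10 then nd + 30 * z
        else if x = 1 then nd + 28 * z
        else nd + 31 * z)
       ((if month > 2 then -(PySem.Int.floordiv (-(year - 1990)) 4) else PySem.Int.floordiv (year - 1990) 4)
         + (year - 1990) * 365 + (day - 6)))
    = pvKuberaDays day month year := by
  simp only [pvKuberaDays]
  by_cases hy : month - 2 < 0
  · have h1 : ¬ (month - 2 ≥ 0) := by omega
    simp only [hy, if_true, h1, if_false]
    have hn : -(month - 2) = ((2 - month).toNat : Int) := by omega
    rw [hn, kubera_loop_sum]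
    have : ((2 - month).toNat : Int) = 2 - month := by omega
    rw [this]; ring
  · have h1 : month - 2 ≥ 0 := by omega
    simp only [hy, if_false, h1, if_true]
    have hn : month - 2 = ((month - 2).toNat : Int) := by omega
    rw [hn, kubera_loop_sum, ← hn]
    ring

-- the extra "% 432" in A's day index is the identity (the argument already lies in [0, 36))
theorem mod36_mod432 (r : Int) : PySem.Int.mod (PySem.Int.mod r 36) 432 = PySem.Int.mod r 36 := by
  rw [PySem.Int.mod_eq_emod_of_pos (by norm_num), PySem.Int.mod_eq_emod_of_pos (by norm_num)]
  omega

-- |m|-form of the span term equals pvKuberaDays' sign-split form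
theorem abs_span_eq (day month year : Int) :
    (if month > 2 then -(PySem.Int.floordiv (-(year - 1990)) 4) else PySem.Int.floordiv (year - 1990) 4)
      + (year - 1990) * 365 + (day - 6)
      + (if month - 2 ≥ 0 then kuberaSpan |month - 2| else -(kuberaSpan |month - 2|))
    = pvKuberaDays day month year := by
  unfold pvKuberaDays
  congr 1
  by_cases h : month - 2 ≥ 0
  · rw [abs_of_nonneg h, if_pos h, if_pos h]
  · rw [abs_of_neg (by omega), if_neg h, if_neg h]
    congr 1
    ring

-- ===== VERDICT (by name: the statement is the Claim_ definition above) =====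
theorem kubera_calc_py_spec : Claim_equal_kubera_calc_py := by
  intro day month year hour attributes today _ _
  unfold Spec_kubera_calc_py kubera_calc_py kubera_calc_py_alt
  simp only []
  rw [kubera_days_eq day month year, mod36_mod432, abs_span_eq day month year]
  cases today <;> simp
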